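-- pv_equiv track=rewrite | github.com/ColdHumour/ProjectEulerToolkit | combinatoric.py | seq_partitions
-- ===== SOURCE A (Python) =====
-- def seq_partitions(sequence, p):
--     """
--     list all permutations of the sequence satisfying given partition p
--
--     e.g. seq_partition([1, 2, 3], [1, 2]) == [[[1], [2, 3]], [[2], [1, 3]], [[3], [1, 2]]]
--     """
--
--     from itertools import combinations
--
--     if len(sequence) != sum(p):
--         raise ValueError("The length of sequence doesn't match given partition!")
--
--     if len(p) == 1:
--         output = []
--         for subp in combinations(sequence, p[0]):
--             output += [[list(subp)]]
--         return output
--     else: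
--         output = []
--         for subp in combinations(sequence, p[0]):
--             newseq = [ele for ele in sequence if ele not in subp]
--             output += [[list(subp)] + s for s in seq_partitions(newseq, p[1:])]
--         return output
-- ===== SOURCE B (Python) =====
-- def seq_partitions(sequence, p):
--     """
--     list all permutations of the sequence satisfying given partition p
--
--     Iterative worklist version: one pass over p, each state pairs the
--     partition built so far with the still-available elements.
--     """
--     from itertools import combinations
--
--     suffix = sum(p)
--     states = [([], list(sequence))]
--     for size in p:
--         if any(len(rem) != suffix for _, rem in states):
--             raise ValueError("The length of sequence doesn't match given partition!")
--         suffix -= size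
--         nxt = []
--         for parts, rem in states:
--             for subp in combinations(rem, size):
--                 nxt.append((parts + [list(subp)],
--                             [e for e in rem if e not in subp]))
--         states = nxt
--     return [parts for parts, _ in states]
-- ===== Notes on version B (the rewrite author's own statement) =====
-- stated objective: alternative
-- what changed: Replaces A's per-block recursion with a single iterative fold over p that expands a worklist of (partition-so-far, remaining-elements) states level by level, preserving A's enumeration order.
-- outside the precondition, e.g. on seq_partitions([1, 1], [0, 2]): A returns [[[], [1, 1]]], B returns [[[], [1, 1]]]; on seq_partitions([1], [2, -1]): A returns [], B returns []
import Mathlib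
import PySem

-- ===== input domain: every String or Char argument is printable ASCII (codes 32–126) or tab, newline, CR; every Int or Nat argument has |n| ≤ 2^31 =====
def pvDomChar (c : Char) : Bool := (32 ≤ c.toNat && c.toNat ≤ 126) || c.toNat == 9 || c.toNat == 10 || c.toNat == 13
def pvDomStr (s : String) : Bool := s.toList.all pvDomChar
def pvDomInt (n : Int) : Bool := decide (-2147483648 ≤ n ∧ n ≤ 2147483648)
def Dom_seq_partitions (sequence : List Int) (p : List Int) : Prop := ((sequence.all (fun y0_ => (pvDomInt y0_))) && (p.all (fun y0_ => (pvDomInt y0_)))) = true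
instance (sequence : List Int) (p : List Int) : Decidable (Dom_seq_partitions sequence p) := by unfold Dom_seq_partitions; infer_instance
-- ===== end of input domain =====

-- B rewrites A's recursion as a single iterative fold over p with a worklist of
-- (partition-so-far, remaining-elements) states; same output values and order.

-- ===== PORT A =====
-- itertools.combinations(xs, r): r-element tuples of xs in lexicographic index
-- order (exact for r ≥ 0; for r < 0 Python raises ValueError — excluded by Pre_,
-- and that case is never reached on inputs satisfying Pre_).
def pvCombs (xs : List Int) (k : Nat) : List (List Int) :=
  match k, xs with
  | 0, _ => [[]]
  | _ + 1, [] => []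
  | k + 1, x :: rest => (pvCombs rest k).map (fun t => x :: t) ++ pvCombs rest (k + 1)

def pvCombsI (xs : List Int) (k : Int) : List (List Int) :=
  if k < 0 then [] else pvCombs xs k.toNat

-- literal transliteration of A (the ValueError / p[0]-IndexError paths are
-- excluded by Pre_; on them this total function just recurses without raising)
def seq_partitions (sequence : List Int) (p : List Int) : List (List (List Int)) :=
  match p with
  | [] => []  -- Python raises IndexError at p[0] here; outside Pre_
  | [k] =>
    (pvCombsI sequence k).foldl (fun output subp => output ++ [[subp]]) []
  | k :: rest =>
    (pvCombsI sequence k).foldl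
      (fun output subp =>
        output ++
          (seq_partitions (sequence.filter (fun ele => !subp.contains ele)) rest).map
            (fun s => subp :: s))
      []

-- ===== PORT B =====
-- one worklist-expansion level of Source B's loop body (the raise is outside Pre_)
def pvStep (states : List (List (List Int) × List Int)) (size : Int) :
    List (List (List Int) × List Int) :=
  states.foldl
    (fun nxt st =>
      nxt ++
        (pvCombsI st.2 size).map
          (fun subp => (st.1 ++ [subp], st.2.filter (fun e => !subp.contains e))))
    []

def seq_partitions_alt (sequence : List Int) (p : List Int) : List (List (List Int)) :=
  (p.foldl pvStep [([], sequence)]).map (fun st => st.1)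

-- ===== PRECONDITION & SPEC =====
-- Pre_ excludes the inputs where A raises (length/partition mismatch, empty p,
-- or sizes making some recursive level's length check fail); for simplicity it
-- conservatively also excludes negative sizes and duplicate-element sequences
-- with several blocks even when A happens to return there (B returns the same
-- value on those — see the cited examples).
def Pre_seq_partitions (sequence : List Int) (p : List Int) : Prop :=
  (sequence.length : Int) = p.sum ∧ p ≠ [] ∧ (∀ x ∈ p, 0 ≤ x) ∧
    (p.length = 1 ∨ sequence.Nodup)
instance (sequence : List Int) (p : List Int) : Decidable (Pre_seq_partitions sequence p) := by
  unfold Pre_seq_partitions; infer_instance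

def pvWitness_seq_partitions : List Int × List Int := ([1, 2, 3], [1, 2])

def Spec_seq_partitions (sequence : List Int) (p : List Int) (out : List (List (List Int))) : Prop := out = seq_partitions_alt sequence p
instance (sequence : List Int) (p : List Int) (out : List (List (List Int))) : Decidable (Spec_seq_partitions sequence p out) := by unfold Spec_seq_partitions; infer_instance

-- ===== CLAIM (what is proved, stated in full; the proofs are below) =====
def Claim_equal_seq_partitions : Prop := ∀ (sequence : List Int) (p : List Int), Dom_seq_partitions sequence p → Pre_seq_partitions sequence p → Spec_seq_partitions sequence p (seq_partitions sequence p)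

-- ===== LEMMAS AND PROOFS =====
theorem pvStep_eq_flatMap (states : List (List (List Int) × List Int)) (size : Int) :
    pvStep states size =
      states.flatMap (fun st =>
        (pvCombsI st.2 size).map
          (fun subp => (st.1 ++ [subp], st.2.filter (fun e => !subp.contains e)))) := by
  unfold pvStep
  rw [PySem.List.foldl_append_eq_flatMap]
  simp

theorem pvStep_singleton (st : List (List Int) × List Int) (size : Int) :
    pvStep [st] size =
      (pvCombsI st.2 size).map
        (fun subp => (st.1 ++ [subp], st.2.filter (fun e => !subp.contains e))) := by
  rw [pvStep_eq_flatMap]; simp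

theorem foldl_pvStep_flatMap (p : List Int) (states : List (List (List Int) × List Int)) :
    List.foldl pvStep states p = states.flatMap (fun st => List.foldl pvStep [st] p) := by
  induction p generalizing states with
  | nil => simp
  | cons k rest ih =>
    simp only [List.foldl_cons]
    rw [ih (pvStep states k), pvStep_eq_flatMap]
    rw [List.flatMap_assoc]
    congr 1
    funext st
    rw [ih (pvStep [st] k), pvStep_singleton]

theorem pvKey (rest : List Int) :
    ∀ (k : Int) (seq : List Int) (parts : List (List Int)),
      (List.foldl pvStep [(parts, seq)] (k :: rest)).map Prod.fst =
        (seq_partitions seq (k :: rest)).map (fun s => parts ++ s) := by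
  induction rest with
  | nil =>
    intro k seq parts
    simp only [List.foldl_cons, List.foldl_nil, pvStep_singleton, seq_partitions]
    rw [PySem.List.foldl_append_singleton_eq_map]
    simp [List.map_map, Function.comp]
  | cons r rs ih =>
    intro k seq parts
    rw [List.foldl_cons, pvStep_singleton, foldl_pvStep_flatMap, List.map_flatMap,
      List.flatMap_map]
    show _ = (seq_partitions seq (k :: r :: rs)).map (fun s => parts ++ s)
    rw [seq_partitions, PySem.List.foldl_append_eq_flatMap, List.nil_append,
      List.map_flatMap]
    congr 1
    funext subp
    rw [ih r]
    simp [List.map_map, Function.comp, List.append_assoc]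
    exact List.cons_ne_nil r rs

-- ===== VERDICT (by name: the statement is the Claim_ definition above) =====
theorem seq_partitions_spec : Claim_equal_seq_partitions := by
  intro sequence p _ hpre
  unfold Spec_seq_partitions seq_partitions_alt
  obtain ⟨k, rest, rfl⟩ : ∃ k rest, p = k :: rest := by
    cases p with
    | nil => exact absurd rfl hpre.2.1
    | cons k rest => exact ⟨k, rest, rfl⟩
  rw [pvKey rest k sequence []]
  simp
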